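-- pv_equiv track=rewrite | github.com/FrancoisPerez/Meeko-backup | main.py | build_array_of_dates
-- ===== SOURCE A (Python) =====
-- SECONDS_IN_A_DAY = 60 * 60 * 24
--
-- def build_array_of_dates(START_TIMESTAMP, END_TIMESTAMP):
--     start = START_TIMESTAMP
--     end = END_TIMESTAMP
--     array_of_dates = []
--
--     while end <= END_TIMESTAMP:
--         array_of_dates.append([start, start + SECONDS_IN_A_DAY])
--
--         # Re-init of start and end
--         start += SECONDS_IN_A_DAY
--         end = start + SECONDS_IN_A_DAY
--
--     return array_of_dates
-- ===== SOURCE B (Python) =====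
-- SECONDS_IN_A_DAY = 60 * 60 * 24
--
-- def build_array_of_dates(START_TIMESTAMP, END_TIMESTAMP):
--     # A's while-loop always runs once (its first test compares END with itself),
--     # so the number of intervals is max(1, floor((END - START) / day)).
--     n = max(1, (END_TIMESTAMP - START_TIMESTAMP) // SECONDS_IN_A_DAY)
--     return [[START_TIMESTAMP + k * SECONDS_IN_A_DAY,
--              START_TIMESTAMP + (k + 1) * SECONDS_IN_A_DAY] for k in range(n)]
-- ===== Notes on version B (the rewrite author's own statement) =====
-- stated objective: simpler
-- what changed: Replaces the predicate-driven while loop with running start/end state by a closed-form interval count n = max(1, (END-START)//day) followed by a direct comprehension over range(n).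
import Mathlib
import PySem

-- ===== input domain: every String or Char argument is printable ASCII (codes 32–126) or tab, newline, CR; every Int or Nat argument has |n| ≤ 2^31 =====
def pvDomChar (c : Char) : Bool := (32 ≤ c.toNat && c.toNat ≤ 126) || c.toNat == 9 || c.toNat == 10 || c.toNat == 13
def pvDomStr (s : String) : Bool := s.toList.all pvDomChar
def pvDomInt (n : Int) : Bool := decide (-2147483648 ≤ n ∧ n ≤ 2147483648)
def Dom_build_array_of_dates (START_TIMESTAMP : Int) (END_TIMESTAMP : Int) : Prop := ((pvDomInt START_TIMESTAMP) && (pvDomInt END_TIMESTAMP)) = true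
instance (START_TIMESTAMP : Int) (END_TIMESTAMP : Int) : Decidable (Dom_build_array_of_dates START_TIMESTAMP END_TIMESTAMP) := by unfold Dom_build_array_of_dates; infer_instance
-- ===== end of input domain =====

-- B replaces A's predicate-driven while loop by a closed-form interval count plus a
-- comprehension over range(n); objective: simpler.

-- ===== PORT A =====
-- A's while loop, transliterated with a fuel guard that only makes the recursion
-- total (the fuel chosen at the call site provably exceeds the iteration count).
def buildLoopA (fuel : Nat) (ENDT : Int) (start e : Int) (acc : List (List Int)) : List (List Int) :=
  match fuel with
  | 0 => acc
  | fuel + 1 =>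
    if e ≤ ENDT then
      buildLoopA fuel ENDT (start + 86400) ((start + 86400) + 86400)
        (acc ++ [[start, start + 86400]])
    else acc

def build_array_of_dates (START_TIMESTAMP : Int) (END_TIMESTAMP : Int) : List (List Int) :=
  buildLoopA ((END_TIMESTAMP - START_TIMESTAMP).toNat + 2) END_TIMESTAMP
    START_TIMESTAMP END_TIMESTAMP []

-- ===== PORT B =====
def build_array_of_dates_alt (START_TIMESTAMP : Int) (END_TIMESTAMP : Int) : List (List Int) :=
  let n : Int := max 1 (PySem.Int.floordiv (END_TIMESTAMP - START_TIMESTAMP) 86400)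
  (PySem.List.pyRange 0 n 1).map (fun k =>
    [START_TIMESTAMP + k * 86400, START_TIMESTAMP + (k + 1) * 86400])

-- ===== PRECONDITION & SPEC =====
def Spec_build_array_of_dates (START_TIMESTAMP : Int) (END_TIMESTAMP : Int) (out : List (List Int)) : Prop := out = build_array_of_dates_alt START_TIMESTAMP END_TIMESTAMP
instance (START_TIMESTAMP : Int) (END_TIMESTAMP : Int) (out : List (List Int)) : Decidable (Spec_build_array_of_dates START_TIMESTAMP END_TIMESTAMP out) := by unfold Spec_build_array_of_dates; infer_instance

-- ===== CLAIM (what is proved, stated in full; the proofs are below) =====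
def Claim_equal_build_array_of_dates : Prop := ∀ (START_TIMESTAMP : Int) (END_TIMESTAMP : Int), Dom_build_array_of_dates START_TIMESTAMP END_TIMESTAMP → Spec_build_array_of_dates START_TIMESTAMP END_TIMESTAMP (build_array_of_dates START_TIMESTAMP END_TIMESTAMP)

-- ===== LEMMAS AND PROOFS =====

-- After the first (unconditional) iteration, the loop state is (S + j*d, S + (j+1)*d)
-- for j ≥ 1; with enough fuel it appends exactly the intervals j, j+1, …, n-1.
theorem buildLoopA_tail (S E : Int) :
    ∀ (fuel : Nat) (j : Int) (acc : List (List Int)), 1 ≤ j →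
      max 1 (PySem.Int.floordiv (E - S) 86400) ≤ j + fuel →
      buildLoopA fuel E (S + j * 86400) (S + (j + 1) * 86400) acc
        = acc ++ (PySem.List.pyRange j (max 1 (PySem.Int.floordiv (E - S) 86400)) 1).map
            (fun k => [S + k * 86400, S + (k + 1) * 86400]) := by
  intro fuel
  induction fuel with
  | zero =>
    intro j acc hj hle
    have h : PySem.List.pyRange j (max 1 (PySem.Int.floordiv (E - S) 86400)) 1 = [] :=
      PySem.List.pyRange_one_eq_nil (by simpa using hle)
    rw [h]; simp [buildLoopA]
  | succ fuel ih =>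
    intro j acc hj hle
    have hfd : PySem.Int.floordiv (E - S) 86400 = (E - S) / 86400 :=
      PySem.Int.floordiv_eq_ediv_of_pos (by norm_num)
    rw [buildLoopA]
    by_cases hc : S + (j + 1) * 86400 ≤ E
    · have hjn : j < max 1 (PySem.Int.floordiv (E - S) 86400) := by
        rw [hfd]; omega
      rw [if_pos hc]
      have harg1 : S + j * 86400 + 86400 = S + (j + 1) * 86400 := by ring
      have harg2 : S + (j + 1) * 86400 + 86400 = S + ((j + 1) + 1) * 86400 := by ring
      rw [harg1, harg2, ih (j + 1) _ (by omega) (by push_cast at hle ⊢; omega)]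
      rw [PySem.List.pyRange_one_cons hjn]
      simp
    · have hn : max 1 (PySem.Int.floordiv (E - S) 86400) ≤ j := by
        rw [hfd]; omega
      rw [if_neg hc, PySem.List.pyRange_one_eq_nil hn]
      simp

-- ===== VERDICT (by name: the statement is the Claim_ definition above) =====
theorem build_array_of_dates_spec : Claim_equal_build_array_of_dates := by
  intro S E _
  unfold Spec_build_array_of_dates build_array_of_dates
  simp only [build_array_of_dates_alt]
  set n : Int := max 1 (PySem.Int.floordiv (E - S) 86400) with hn
  have hfd : PySem.Int.floordiv (E - S) 86400 = (E - S) / 86400 :=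
    PySem.Int.floordiv_eq_ediv_of_pos (by norm_num)
  have hn1 : 1 ≤ n := le_max_left _ _
  -- first iteration of the loop always runs (E ≤ E)
  rw [buildLoopA, if_pos (le_refl E)]
  have h1 : S + 86400 = S + 1 * 86400 := by ring
  have h2 : S + 1 * 86400 + 86400 = S + (1 + 1) * 86400 := by ring
  have hfuel : n ≤ 1 + ((E - S).toNat + 1 : Nat) := by
    rw [hn, hfd]; omega
  rw [h1, h2, buildLoopA_tail S E ((E - S).toNat + 1) 1 _ le_rfl (by exact_mod_cast hfuel)]
  rw [PySem.List.pyRange_one_cons (by omega : (0:Int) < n)]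
  simp
  rw [hn, hfd]
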